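-- pv_equiv track=rewrite | github.com/jonolimagnus/forritun_3 | heimavinna/Fall_01__æfingaverkefni.py | fix_start
-- ===== SOURCE A (Python) =====
-- def fix_start(s):
--     # +++Þinn kóði+++
--     stafur = s[0]
--     temp =""
--     for x in range(len(s)):
--         if stafur ==s[x]and x !=0:
--             temp = temp + "*"
--         else:
--             temp = temp+s[x]
--     return temp
-- ===== SOURCE B (Python) =====
-- def fix_start(s):
--     return s[0] + s[1:].replace(s[0], "*")
-- ===== Notes on version B (the rewrite author's own statement) =====
-- stated objective: faster
-- what changed: Replaces the explicit index loop with char-by-char string concatenation by a single C-level str.replace sweep over the tail s[1:], prefixed by the unchanged first character.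
import Mathlib
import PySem

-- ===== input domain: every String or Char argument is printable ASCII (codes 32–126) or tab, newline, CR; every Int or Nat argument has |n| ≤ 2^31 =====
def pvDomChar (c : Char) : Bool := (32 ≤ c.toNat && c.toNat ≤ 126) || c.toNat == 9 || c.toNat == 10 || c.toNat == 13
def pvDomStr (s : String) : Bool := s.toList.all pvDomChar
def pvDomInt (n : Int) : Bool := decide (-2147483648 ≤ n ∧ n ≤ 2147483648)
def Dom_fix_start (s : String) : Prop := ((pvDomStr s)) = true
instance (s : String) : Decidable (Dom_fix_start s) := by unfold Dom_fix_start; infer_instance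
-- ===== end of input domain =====

-- B replaces A's index loop with one str.replace sweep over the tail; equivalence proved on non-empty strings (both raise IndexError on "").

-- ===== PORT A =====
-- stafur = s[0]; temp = ""; for x in range(len(s)): temp += "*" if stafur == s[x] and x != 0 else s[x]
def fix_start (s : String) : String :=
  let cs := s.toList
  let stafur := PySem.List.pyGetD cs 0 ' '
  let temp := (PySem.List.pyRange 0 (PySem.List.len cs)).foldl
    (fun temp x =>
      if stafur == PySem.List.pyGetD cs x ' ' && x != 0 then temp ++ ['*']
      else temp ++ [PySem.List.pyGetD cs x ' ']) []
  String.mk temp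

-- ===== PORT B =====
-- return s[0] + s[1:].replace(s[0], "*")
def fix_start_alt (s : String) : String :=
  let stafur := PySem.List.pyGetD s.toList 0 ' '
  String.mk ([stafur] ++ PySem.Chars.replace (PySem.List.slice s.toList (some 1) none) [stafur] ['*'])

-- ===== PRECONDITION & SPEC =====
-- Pre_ excludes only the empty string, on which A (s[0]) raises IndexError.
def Pre_fix_start (s : String) : Prop := s.toList ≠ []
instance (s : String) : Decidable (Pre_fix_start s) := by unfold Pre_fix_start; infer_instance
def pvWitness_fix_start : String := "banana"

def Spec_fix_start (s : String) (out : String) : Prop := out = fix_start_alt s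
instance (s : String) (out : String) : Decidable (Spec_fix_start s out) := by unfold Spec_fix_start; infer_instance

-- ===== CLAIM (what is proved, stated in full; the proofs are below) =====
def Claim_equal_fix_start : Prop := ∀ (s : String), Dom_fix_start s → Pre_fix_start s → Spec_fix_start s (fix_start s)

-- ===== LEMMAS AND PROOFS =====

-- replace.go with a single-char pattern is the pointwise map
lemma replace_go_single (c : Char) (fuel : Nat) :
    ∀ (t : List Char) (acc : List Char), t.length ≤ fuel →
      PySem.Chars.replace.go [c] ['*'] fuel t acc
        = acc.reverse ++ t.map (fun x => if x == c then '*' else x) := by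
  induction fuel with
  | zero =>
    intro t acc h
    have : t = [] := List.eq_nil_of_length_eq_zero (Nat.le_zero.mp h)
    subst this
    simp [PySem.Chars.replace.go]
  | succ n ih =>
    intro t acc h
    cases t with
    | nil => simp [PySem.Chars.replace.go]
    | cons a t =>
      by_cases hac : a = c
      · subst hac
        have hpre : List.isPrefixOf [a] (a :: t) = true := by
          simp [List.isPrefixOf]
        rw [PySem.Chars.replace.go]
        simp only [hpre, if_pos, List.length_cons, List.length_nil, List.drop_succ_cons,
          List.drop_zero]
        rw [ih t _ (by simpa using h)]
        simp
      · have hpre : List.isPrefixOf [c] (a :: t) = true ↔ False := by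
          simp [List.isPrefixOf]; intro hh; exact hac hh.symm
        rw [PySem.Chars.replace.go]
        simp only [eq_iff_iff.mpr hpre, if_neg, iff_false]
        rw [ih t _ (by simpa using h)]
        simp only [List.reverse_cons, List.append_assoc, List.singleton_append, List.map_cons]
        have : (a == c) = false := by simp [hac]
        simp [this]

lemma replace_single (c : Char) (t : List Char) :
    PySem.Chars.replace t [c] ['*'] = t.map (fun x => if x == c then '*' else x) := by
  rw [PySem.Chars.replace]
  simp only [List.isEmpty_cons, if_neg Bool.false_ne_true]
  exact replace_go_single c t.length t [] (le_refl _)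

-- the mapped index sweep over the tail
lemma range_map_tail (c : Char) (t : List Char) :
    (List.range t.length).map
        (fun j => if (c == t.getD j ' ') then '*' else t.getD j ' ')
      = t.map (fun x => if x == c then '*' else x) := by
  induction t with
  | nil => simp
  | cons a t ih =>
    rw [List.length_cons, List.range_succ_eq_map]
    simp only [List.map_cons, List.map_map]
    refine List.cons_eq_cons.mpr ⟨?_, ?_⟩
    · by_cases hac : a = c
      · simp [hac]
      · simp [hac, Ne.symm hac]
    · simpa [Function.comp] using ih

-- ===== VERDICT (by name: the statement is the Claim_ definition above) =====
theorem fix_start_spec : Claim_equal_fix_start := by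
  intro s _ hpre
  unfold Spec_fix_start fix_start fix_start_alt
  obtain ⟨c, t, hct⟩ : ∃ c t, s.toList = c :: t := by
    cases h : s.toList with
    | nil => exact absurd h hpre
    | cons c t => exact ⟨c, t, rfl⟩
  rw [hct]
  simp only [PySem.List.slice_from_one, List.tail_cons, replace_single]
  have hlen : PySem.List.len (c :: t) = ((t.length + 1 : Nat) : Int) := by
    simp [PySem.List.len]
  rw [hlen, PySem.List.pyRange_zero_natCast]
  have hfold :
      ∀ (f : Int → Char) (l : List Int) (acc : List Char),
        l.foldl (fun temp x => if (c == PySem.List.pyGetD (c :: t) x ' ' && x != 0) then temp ++ ['*'] else temp ++ [PySem.List.pyGetD (c :: t) x ' ']) acc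
          = acc ++ l.map (fun x => if (c == PySem.List.pyGetD (c :: t) x ' ' && x != 0) then '*' else PySem.List.pyGetD (c :: t) x ' ') := by
    intro f l
    induction l with
    | nil => simp
    | cons a l ih =>
      intro acc
      rw [List.foldl_cons, List.map_cons]
      by_cases h : (c == PySem.List.pyGetD (c :: t) a ' ' && a != 0) = true
      · rw [if_pos h, if_pos h, ih]; simp
      · rw [if_neg h, if_neg h, ih]; simp
  simp only [PySem.List.pyGetD_zero_cons]
  rw [hfold (fun _ => ' ')]
  simp only [List.nil_append, List.map_map]
  congr 1
  rw [List.range_succ_eq_map]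
  simp only [List.map_cons, List.map_map, List.singleton_append]
  refine List.cons_eq_cons.mpr ⟨?_, ?_⟩
  · simp [PySem.List.pyGetD_zero_cons]
  · rw [← range_map_tail c t]
    apply List.map_congr_left
    intro j hj
    simp only [Function.comp]
    have h1 : PySem.List.pyGetD (c :: t) ((j : Int) + 1) ' ' = t.getD j ' ' := by
      have : ((j : Int) + 1) = ((j + 1 : Nat) : Int) := by push_cast; ring
      rw [this, PySem.List.pyGetD_natCast]
      simp
    have h2 : (((j : Int) + 1) != 0) = true := by
      simp
      omega
    simp [h1, h2]
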